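-- pv_equiv track=rewrite | github.com/FrontiniFederico/leetcode | python/grumpy.py | secretGrumpiness
-- ===== SOURCE A (Python) =====
-- def satisfiedCustomer(customers: list, grumpy: list) -> int:
--     """Senza curars della sliding window, calcola i clienti soddisfatti."""
--     total: int = 0
--     for index, elem in enumerate(customers):
--         if not grumpy[index]:
--             total += customers[index]
--     return total
--
-- def secretGrumpiness(customers, grumpy, minutes) -> int:
--     """Modifica la lista grumpy con i minuti di tecnica segreta
--     e calcola i clienti soddisfatti."""
--     max: int = 0
--     for index in range(len(customers)-minutes+1):
--         grumpy_copy: list = grumpy.copy()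
--         for mod in range(minutes):
--             grumpy_copy[index+mod] = 0
--         esito = satisfiedCustomer(customers, grumpy_copy)
--         if esito>max:
--             max = esito
--     return max
-- ===== SOURCE B (Python) =====
-- def secretGrumpiness(customers, grumpy, minutes):
--     """Prefix sums: each window placement is scored in O(1) instead of re-scanning."""
--     base = sum(c for c, g in zip(customers, grumpy) if not g)
--     lost = [c if g else 0 for c, g in zip(customers, grumpy)]
--     prefix = [0]
--     for x in lost:
--         prefix.append(prefix[-1] + x)
--     best = 0
--     for i in range(len(customers) - minutes + 1):
--         best = max(best, base + prefix[i + minutes] - prefix[i])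
--     return best
-- ===== Notes on version B (the rewrite author's own statement) =====
-- stated objective: faster
-- what changed: Replaced A's per-start re-scan (copy grumpy, zero a window, re-sum all satisfied customers) by a prefix-sum array over the grumpy-lost customers so each window placement is scored in O(1); Pre_ excludes negative minutes, on which B's prefix indexing raises IndexError, and grumpy shorter than customers with minutes not exceeding len(customers), on which A raises IndexError.
-- outside the precondition, e.g. on secretGrumpiness([5], [0], -1): A returns 5, B raises IndexError
import Mathlib
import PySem

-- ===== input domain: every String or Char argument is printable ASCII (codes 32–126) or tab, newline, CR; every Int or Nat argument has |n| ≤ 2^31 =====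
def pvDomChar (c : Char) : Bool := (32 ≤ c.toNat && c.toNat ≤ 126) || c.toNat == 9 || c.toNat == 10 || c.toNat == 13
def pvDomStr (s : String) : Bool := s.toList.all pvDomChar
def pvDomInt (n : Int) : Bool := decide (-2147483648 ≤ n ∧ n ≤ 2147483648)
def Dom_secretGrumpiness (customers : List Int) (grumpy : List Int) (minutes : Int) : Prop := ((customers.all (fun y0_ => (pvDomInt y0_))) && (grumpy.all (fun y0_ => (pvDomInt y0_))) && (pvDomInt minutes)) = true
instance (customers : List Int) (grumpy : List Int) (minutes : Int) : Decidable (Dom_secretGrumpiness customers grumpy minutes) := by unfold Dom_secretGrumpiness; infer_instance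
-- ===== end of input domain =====

-- B replaces A's per-start re-scan (copy grumpy, zero a window, re-sum) by a prefix-sum
-- array over the grumpy-lost customers; objective: faster (asymptotic).

-- ===== PORT A =====
-- helper satisfiedCustomer: 'if not grumpy[index]: total += customers[index]'
def pvSatisfied (customers : List Int) (grumpy : List Int) : Int :=
  (PySem.List.enumerate customers).foldl
    (fun total p =>
      if PySem.List.pyGetD grumpy p.1 1 = 0 then total + PySem.List.pyGetD customers p.1 0
      else total)
    0

def secretGrumpiness (customers : List Int) (grumpy : List Int) (minutes : Int) : Int :=
  (PySem.List.pyRange 0 ((customers.length : Int) - minutes + 1)).foldl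
    (fun mx index =>
      let grumpyCopy :=
        (PySem.List.pyRange 0 minutes).foldl
          (fun g md => PySem.List.pySetD g (index + md) 0) grumpy
      let esito := pvSatisfied customers grumpyCopy
      if esito > mx then esito else mx)
    0

-- ===== PORT B =====
def secretGrumpiness_alt (customers : List Int) (grumpy : List Int) (minutes : Int) : Int :=
  let pairs := customers.zip grumpy
  let base := pairs.foldl (fun s p => if p.2 == 0 then s + p.1 else s) 0
  let lost := pairs.map (fun p => if p.2 == 0 then (0 : Int) else p.1)
  let pref := lost.foldl (fun pr x => pr ++ [PySem.List.pyGetD pr (-1) 0 + x]) [(0 : Int)]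
  (PySem.List.pyRange 0 ((customers.length : Int) - minutes + 1)).foldl
    (fun best i =>
      max best (base + PySem.List.pyGetD pref (i + minutes) 0 - PySem.List.pyGetD pref i 0))
    0

-- ===== PRECONDITION & SPEC =====
-- Pre_ excludes exactly the crashing inputs: negative minutes, on which B's prefix indexing
-- raises IndexError (A returns there), and grumpy shorter than customers while A's loop runs
-- (minutes ≤ len(customers)), on which A raises IndexError.
def Pre_secretGrumpiness (customers : List Int) (grumpy : List Int) (minutes : Int) : Prop :=
  0 ≤ minutes ∧ (customers.length ≤ grumpy.length ∨ (customers.length : Int) < minutes)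
instance (customers : List Int) (grumpy : List Int) (minutes : Int) : Decidable (Pre_secretGrumpiness customers grumpy minutes) := by unfold Pre_secretGrumpiness; infer_instance

def pvWitness_secretGrumpiness : List Int × List Int × Int :=
  ([1, 0, 1, 2, 1, 1, 7, 5], [0, 1, 0, 1, 0, 1, 0, 1], 3)

def Spec_secretGrumpiness (customers : List Int) (grumpy : List Int) (minutes : Int) (out : Int) : Prop := out = secretGrumpiness_alt customers grumpy minutes
instance (customers : List Int) (grumpy : List Int) (minutes : Int) (out : Int) : Decidable (Spec_secretGrumpiness customers grumpy minutes out) := by unfold Spec_secretGrumpiness; infer_instance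

-- ===== CLAIM (what is proved, stated in full; the proofs are below) =====
def Claim_equal_secretGrumpiness : Prop := ∀ (customers : List Int) (grumpy : List Int) (minutes : Int), Dom_secretGrumpiness customers grumpy minutes → Pre_secretGrumpiness customers grumpy minutes → Spec_secretGrumpiness customers grumpy minutes (secretGrumpiness customers grumpy minutes)

-- ===== LEMMAS AND PROOFS =====

lemma pvFoldIfAdd {α : Type} (P : α → Prop) [DecidablePred P] (A : α → Int) (l : List α) (s : Int) :
    l.foldl (fun t x => if P x then t + A x else t) s
      = s + (l.map (fun x => if P x then A x else 0)).sum := by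
  induction l generalizing s with
  | nil => simp
  | cons x xs ih =>
    simp only [List.foldl_cons, List.map_cons, List.sum_cons]
    rw [ih]; split_ifs <;> ring

lemma zip_drop' {α β : Type} (xs : List α) (ys : List β) (n : Nat) :
    (xs.zip ys).drop n = (xs.drop n).zip (ys.drop n) := by
  induction xs generalizing ys n with
  | nil => simp
  | cons x xs ih =>
    cases ys with
    | nil => simp
    | cons y ys =>
      cases n with
      | zero => simp
      | succ n => simpa using ih ys n

lemma zip_take' {α β : Type} (xs : List α) (ys : List β) (n : Nat) :
    (xs.zip ys).take n = (xs.take n).zip (ys.take n) := by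
  induction xs generalizing ys n with
  | nil => simp
  | cons x xs ih =>
    cases ys with
    | nil => simp
    | cons y ys =>
      cases n with
      | zero => simp
      | succ n => simpa using ih ys n

def pvKeep (p : Int × Int) : Int := if p.2 = 0 then p.1 else 0
def pvLose (p : Int × Int) : Int := if p.2 = 0 then 0 else p.1
def pvBase (c g : List Int) : Int := ((c.zip g).map pvKeep).sum
def pvLost (c g : List Int) : List Int := (c.zip g).map pvLose
def pvS (c g : List Int) (a w : Nat) : Int := (((pvLost c g).drop a).take w).sum
def pvV (c g : List Int) (w : Nat) (j : Nat) : Int := pvBase c g + pvS c g j w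

lemma pvSatisfied_eq (c g : List Int) (h : c.length ≤ g.length) :
    pvSatisfied c g = pvBase c g := by
  unfold pvSatisfied pvBase
  rw [show (fun (total : Int) (p : Int × Int) => if PySem.List.pyGetD g p.1 1 = 0 then total + PySem.List.pyGetD c p.1 0 else total) = (fun (t : Int) (x : Int × Int) => if (fun p => PySem.List.pyGetD g p.1 1 = 0) x then t + (fun p => PySem.List.pyGetD c p.1 0) x else t) from rfl,
     pvFoldIfAdd, zero_add]
  congr 1
  apply List.ext_getElem
  · simp [PySem.List.length_enumerate]
    omega
  · intro k hk1 hk2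
    simp only [List.getElem_map, PySem.List.getElem_enumerate, List.getElem_zip]
    have hkc : k < c.length := by
      simpa [PySem.List.length_enumerate] using hk1
    have hkg : k < g.length := lt_of_lt_of_le hkc h
    rw [show ((0 : Int) + (k : Nat)) = ((k : Nat) : Int) by ring]
    rw [PySem.List.pyGetD_natCast, PySem.List.pyGetD_natCast]
    simp [pvKeep, List.getD_eq_getElem?_getD, hkc, hkg]

lemma pvZero_window (g : List Int) (a w : Nat) (h : a + w ≤ g.length) :
    (PySem.List.pyRange 0 (w : Int)).foldl
        (fun g' md => PySem.List.pySetD g' ((a : Int) + md) 0) g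
      = g.take a ++ List.replicate w 0 ++ g.drop (a + w) := by
  induction w with
  | zero =>
    simp [PySem.List.pyRange_one_eq_nil]
  | succ w ih =>
    have hcast : ((w + 1 : Nat) : Int) = (w : Int) + 1 := by push_cast; ring
    rw [hcast, PySem.List.pyRange_one_succ_right (by positivity), List.foldl_append,
        ih (by omega)]
    simp only [List.foldl_cons, List.foldl_nil]
    rw [show ((a : Int) + (w : Int)) = ((a + w : Nat) : Int) by push_cast; ring,
        PySem.List.pySetD_natCast]
    have hlt : a + w < g.length := by omega
    rw [List.drop_eq_getElem_cons hlt]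
    rw [List.set_append]
    have hlen : (List.take a g ++ List.replicate w 0).length = a + w := by
      simp [List.length_take]; omega
    rw [hlen, if_neg (by omega)]
    simp [List.replicate_succ', List.append_assoc]
    rw [show List.drop (a + w) g = g[a + w] :: List.drop (a + w + 1) g from
          List.drop_eq_getElem_cons hlt]
    rfl

lemma pvZipRepKeep (l : List Int) (w : Nat) (h : l.length ≤ w) :
    ((l.zip (List.replicate w (0 : Int))).map pvKeep).sum = l.sum := by
  induction l generalizing w with
  | nil => simp
  | cons x xs ih =>
    cases w with
    | zero => simp at h
    | succ w =>
      simp only [List.replicate_succ, List.zip_cons_cons, List.map_cons, List.sum_cons]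
      rw [ih w (by simpa using h)]
      simp [pvKeep]

lemma pvKeep_add_lose (p : Int × Int) : pvKeep p + pvLose p = p.1 := by
  unfold pvKeep pvLose; split_ifs <;> ring

lemma pvSplitSum (l : List (Int × Int)) :
    (l.map pvKeep).sum + (l.map pvLose).sum = (l.map Prod.fst).sum := by
  rw [← PySem.List.sum_map_add_int]
  congr 1
  exact List.map_congr_left (fun p _ => pvKeep_add_lose p)

lemma pvZipSplit (F : Int × Int → Int) (c1 c2 c3 g1 g2 g3 : List Int)
    (h1 : c1.length = g1.length) (h2 : c2.length = g2.length) :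
    (((c1 ++ c2 ++ c3).zip (g1 ++ g2 ++ g3)).map F).sum
      = ((c1.zip g1).map F).sum + ((c2.zip g2).map F).sum + ((c3.zip g3).map F).sum := by
  rw [List.append_assoc, List.append_assoc, List.zip_append h1, List.zip_append h2]
  simp [List.sum_append, add_assoc]

lemma pvBase_window (c g : List Int) (a w : Nat) (hcw : a + w ≤ c.length)
    (h : c.length ≤ g.length) :
    pvBase c (g.take a ++ List.replicate w 0 ++ g.drop (a + w))
      = pvBase c g + pvS c g a w := by
  have hc : c.take a ++ ((c.drop a).take w ++ c.drop (a + w)) = c := by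
    rw [show c.drop (a + w) = (c.drop a).drop w by rw [List.drop_drop, Nat.add_comm]]
    rw [List.take_append_drop, List.take_append_drop]
  have hg : g.take a ++ ((g.drop a).take w ++ g.drop (a + w)) = g := by
    rw [show g.drop (a + w) = (g.drop a).drop w by rw [List.drop_drop, Nat.add_comm]]
    rw [List.take_append_drop, List.take_append_drop]
  have lc1 : (c.take a).length = a := by simp; omega
  have lg1 : (g.take a).length = a := by simp; omega
  have lc2 : ((c.drop a).take w).length = w := by simp; omega
  have lg2 : ((g.drop a).take w).length = w := by simp; omega
  have hS : pvS c g a w = ((((c.drop a).take w).zip ((g.drop a).take w)).map pvLose).sum := by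
    unfold pvS pvLost
    rw [← List.map_drop, ← List.map_take, zip_drop', zip_take']
  have hmid : ((((c.drop a).take w).zip (List.replicate w (0 : Int))).map pvKeep).sum
      = ((((c.drop a).take w).zip ((g.drop a).take w)).map pvKeep).sum
        + ((((c.drop a).take w).zip ((g.drop a).take w)).map pvLose).sum := by
    rw [pvSplitSum, List.map_fst_zip (by rw [lc2, lg2])]
    exact pvZipRepKeep _ w (le_of_eq lc2)
  have eL : pvBase c (g.take a ++ List.replicate w 0 ++ g.drop (a + w))
      = (((c.take a).zip (g.take a)).map pvKeep).sum
        + ((((c.drop a).take w).zip (List.replicate w (0 : Int))).map pvKeep).sum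
        + (((c.drop (a + w)).zip (g.drop (a + w))).map pvKeep).sum := by
    unfold pvBase
    conv_lhs => rw [← hc]
    rw [← List.append_assoc]
    rw [pvZipSplit pvKeep _ _ _ _ _ _ (by rw [lc1, lg1]) (by simp [lc2])]
  have eR : pvBase c g
      = (((c.take a).zip (g.take a)).map pvKeep).sum
        + ((((c.drop a).take w).zip ((g.drop a).take w)).map pvKeep).sum
        + (((c.drop (a + w)).zip (g.drop (a + w))).map pvKeep).sum := by
    unfold pvBase
    conv_lhs => rw [← hc, ← hg]
    rw [← List.append_assoc, ← List.append_assoc]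
    rw [pvZipSplit pvKeep _ _ _ _ _ _ (by rw [lc1, lg1]) (by rw [lc2, lg2])]
  rw [eL, eR, hS, hmid]
  ring

lemma pvIteMax (a x : Int) : (if x > a then x else a) = max a x := by
  by_cases hx : a < x
  · simp [hx, max_eq_right hx.le]
  · have hx' : x ≤ a := not_lt.mp hx
    simp [not_lt_of_ge hx', max_eq_left hx']

lemma pvBaseFold (l : List (Int × Int)) (s : Int) :
    l.foldl (fun s p => if p.2 == 0 then s + p.1 else s) s = s + (l.map pvKeep).sum := by
  induction l generalizing s with
  | nil => simp
  | cons x xs ih =>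
    simp only [List.foldl_cons, List.map_cons, List.sum_cons]
    rw [ih]
    by_cases h : x.2 = 0
    · simp [pvKeep, h]
      ring
    · simp [pvKeep, h]

lemma pvLoseEq : (fun p : Int × Int => if p.2 == 0 then (0 : Int) else p.1) = pvLose := by
  funext p
  by_cases h : p.2 = 0 <;> simp [pvLose, h]

lemma pvLost_length (c g : List Int) (h : c.length ≤ g.length) :
    (pvLost c g).length = c.length := by
  unfold pvLost; simp [List.length_zip]; omega

-- the prefix fold of B builds exactly the list of prefix sums
lemma pvPrefixFold (l : List Int) :
    l.foldl (fun pr x => pr ++ [PySem.List.pyGetD pr (-1) 0 + x]) [(0 : Int)]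
      = (List.range (l.length + 1)).map (fun j => (l.take j).sum) := by
  induction l using List.reverseRecOn with
  | nil => simp [List.range_succ]
  | append_singleton l x ih =>
    rw [List.foldl_append, ih, List.foldl_cons, List.foldl_nil]
    rw [show (l ++ [x]).length = l.length + 1 by simp]
    rw [List.range_succ (n := l.length + 1), List.map_append]
    congr 1
    · refine List.map_congr_left ?_
      intro j hj
      rw [List.take_append_of_le_length (by
        have := List.mem_range.mp hj; omega)]
    · rw [show (List.range (l.length + 1)).map (fun j => (l.take j).sum)
            = (List.range l.length).map (fun j => (l.take j).sum) ++ [(l.take l.length).sum] by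
          rw [List.range_succ, List.map_append]; rfl]
      rw [PySem.List.pyGetD_neg_one_append_singleton]
      rw [List.take_length]
      simp only [List.map_cons, List.map_nil]
      rw [List.take_of_length_le (by simp)]
      simp

lemma pvTakeSplit (l : List Int) (k m : Nat) :
    (l.take (k + m)).sum = (l.take k).sum + ((l.drop k).take m).sum := by
  rw [List.take_add, List.sum_append]

lemma pvGetDMapRange (f : Nat → Int) (n j : Nat) (h : j < n) :
    ((List.range n).map f).getD j 0 = f j := by
  simp [List.getD_eq_getElem?_getD, h]

lemma pvMain (c g : List Int) (m : Int)
    (hm : 0 ≤ m) (hlen : c.length ≤ g.length ∨ (c.length : Int) < m) :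
    secretGrumpiness c g m = secretGrumpiness_alt c g m := by
  by_cases hbig : (c.length : Int) < m
  · have hnil : PySem.List.pyRange 0 ((c.length : Int) - m + 1) = [] :=
      PySem.List.pyRange_one_eq_nil (by omega)
    simp only [secretGrumpiness, secretGrumpiness_alt, hnil, List.foldl_nil]
  · have hg : c.length ≤ g.length := by
      rcases hlen with h | h
      · exact h
      · omega
    obtain ⟨mN, rfl⟩ : ∃ mN : Nat, m = (mN : Int) := ⟨m.toNat, (Int.toNat_of_nonneg hm).symm⟩
    have hmN : mN ≤ c.length := by omega
    -- A side
    simp only [secretGrumpiness, secretGrumpiness_alt]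
    set F : Int → Int → Int := fun mx index =>
      if pvSatisfied c ((PySem.List.pyRange 0 (mN : Int)).foldl
            (fun g' md => PySem.List.pySetD g' (index + md) 0) g) > mx
      then pvSatisfied c ((PySem.List.pyRange 0 (mN : Int)).foldl
            (fun g' md => PySem.List.pySetD g' (index + md) 0) g)
      else mx with hF
    rw [PySem.List.pyRange_one 0 ((c.length : Int) - (mN : Int) + 1)]
    rw [show (((c.length : Int) - (mN : Int) + 1) - 0).toNat = c.length - mN + 1 by omega]
    rw [List.foldl_map]
    have hbody : ∀ (acc : Int), ∀ k ∈ List.range (c.length - mN + 1),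
        F acc ((0 : Int) + (k : Nat)) = max acc (pvV c g mN k) := by
      intro acc k hk
      have hk' : k + mN ≤ c.length := by
        have := List.mem_range.mp hk; omega
      simp only [hF]
      rw [show (0 : Int) + ((k : Nat) : Int) = ((k : Nat) : Int) by ring]
      rw [pvZero_window g k mN (by omega)]
      rw [pvSatisfied_eq c _ (by
        simp only [List.length_append, List.length_take, List.length_replicate,
          List.length_drop]
        omega)]
      rw [pvBase_window c g k mN (by omega) hg]
      rw [pvIteMax]
      rfl
    rw [PySem.List.foldl_congr_mem _ _ (fun (mx : Int) (k : Nat) => max mx (pvV c g mN k)) 0 hbody]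
    -- B side
    rw [pvLoseEq]
    rw [show List.map pvLose (c.zip g) = pvLost c g from rfl]
    rw [pvBaseFold, zero_add]
    rw [show (List.map pvKeep (c.zip g)).sum = pvBase c g from rfl]
    rw [pvPrefixFold]
    rw [show (pvLost c g).length = c.length from pvLost_length c g hg]
    rw [List.foldl_map]
    have hbody2 : ∀ (acc : Int), ∀ k ∈ List.range (c.length - mN + 1),
        max acc (pvBase c g
            + PySem.List.pyGetD ((List.range (c.length + 1)).map
                (fun j => ((pvLost c g).take j).sum)) (((0 : Int) + (k : Nat)) + (mN : Int)) 0
            - PySem.List.pyGetD ((List.range (c.length + 1)).map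
                (fun j => ((pvLost c g).take j).sum)) ((0 : Int) + (k : Nat)) 0)
          = max acc (pvV c g mN k) := by
      intro acc k hk
      have hk' : k + mN ≤ c.length := by
        have := List.mem_range.mp hk; omega
      rw [show ((0 : Int) + (k : Nat)) + ((mN : Nat) : Int) = ((k + mN : Nat) : Int) by
            push_cast; ring,
          show ((0 : Int) + (k : Nat)) = ((k : Nat) : Int) by ring]
      rw [PySem.List.pyGetD_natCast, PySem.List.pyGetD_natCast]
      rw [pvGetDMapRange _ _ _ (by omega), pvGetDMapRange _ _ _ (by omega)]
      rw [show ((pvLost c g).take (k + mN)).sum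
            = ((pvLost c g).take k).sum + pvS c g k mN from pvTakeSplit (pvLost c g) k mN]
      unfold pvV
      ring_nf
    rw [PySem.List.foldl_congr_mem _ _ (fun (mx : Int) (k : Nat) => max mx (pvV c g mN k)) 0 hbody2]

-- ===== VERDICT (by name: the statement is the Claim_ definition above) =====
theorem secretGrumpiness_spec : Claim_equal_secretGrumpiness := by
  intro customers grumpy minutes _ hpre
  obtain ⟨hm, hlen⟩ := hpre
  exact pvMain customers grumpy minutes hm hlen
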